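-- pv_equiv track=rewrite | github.com/faramer86/BIOPYTHON_ITMO | task2.py | makeShell
-- ===== SOURCE A (Python) =====
-- def makeShell(e):
--     new_list = []
--     counter = 1
--     while counter <= e:
--         new_list.append([0 for i in range(counter)])
--         counter += 1
--     counter -= 2
--     while counter > 0:
--         new_list.append([0 for i in range(counter)])
--         counter -= 1
--     return new_list
-- ===== SOURCE B (Python) =====
-- def makeShell(e):
--     # Build only the rising half by growing one row incrementally,
--     # then mirror it (fresh copies) using the pattern's palindrome symmetry.
--     top = []
--     row = []
--     for _ in range(max(e, 0)):
--         row = row + [0]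
--         top.append(row)
--     return top + [list(r) for r in reversed(top[:-1])]
-- ===== Notes on version B (the rewrite author's own statement) =====
-- stated objective: alternative
-- what changed: Replaces A's two counter-driven while loops (each row rebuilt from scratch by a range comprehension) with a single loop that grows one row incrementally to build the rising half, then produces the falling half by mirroring that half (palindrome symmetry) instead of recomputing it.
import Mathlib
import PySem

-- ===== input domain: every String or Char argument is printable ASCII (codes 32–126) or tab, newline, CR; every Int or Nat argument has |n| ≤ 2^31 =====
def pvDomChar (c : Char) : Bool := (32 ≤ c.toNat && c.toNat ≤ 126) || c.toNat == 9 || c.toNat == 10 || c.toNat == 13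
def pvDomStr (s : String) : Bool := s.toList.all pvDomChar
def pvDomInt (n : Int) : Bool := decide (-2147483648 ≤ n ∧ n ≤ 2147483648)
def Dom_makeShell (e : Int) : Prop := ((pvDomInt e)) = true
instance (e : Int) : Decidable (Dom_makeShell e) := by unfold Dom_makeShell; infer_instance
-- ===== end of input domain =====

-- B replaces A's two counter-driven while loops with one loop growing a single row
-- incrementally for the rising half, then mirrors that half by the palindrome symmetry
-- instead of recomputing it (objective: alternative).


-- ===== PORT A =====
-- [0 for i in range(counter)]
def pvZeros (c : Int) : List Int := (PySem.List.pyRange 0 c 1).map (fun _ => 0)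

-- first while loop: returns (new_list, counter) at exit
def pvLoop1 (e : Int) (acc : List (List Int)) (counter : Int) : List (List Int) × Int :=
  if counter ≤ e then pvLoop1 e (acc ++ [pvZeros counter]) (counter + 1) else (acc, counter)
termination_by (e + 1 - counter).toNat
decreasing_by omega

-- second while loop
def pvLoop2 (acc : List (List Int)) (counter : Int) : List (List Int) :=
  if counter > 0 then pvLoop2 (acc ++ [pvZeros counter]) (counter - 1) else acc
termination_by counter.toNat
decreasing_by omega

def makeShell (e : Int) : List (List Int) :=
  let r := pvLoop1 e [] 1
  pvLoop2 r.1 (r.2 - 2)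

-- ===== PORT B =====
-- for _ in range(max(e,0)): row = row + [0]; top.append(row)
def pvGrowStep (st : List (List Int) × List Int) (_ : Int) : List (List Int) × List Int :=
  let row := st.2 ++ [0]
  (st.1 ++ [row], row)

def makeShell_alt (e : Int) : List (List Int) :=
  let top := ((PySem.List.pyRange 0 (max e 0) 1).foldl pvGrowStep ([], [])).1
  -- top[:-1] = dropLast; reversed(...) = .reverse; list(r) copies r (value-identical)
  top ++ (top.dropLast.reverse.map (fun r => r))

-- ===== PRECONDITION & SPEC =====
def Spec_makeShell (e : Int) (out : List (List Int)) : Prop := out = makeShell_alt e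
instance (e : Int) (out : List (List Int)) : Decidable (Spec_makeShell e out) := by unfold Spec_makeShell; infer_instance

-- ===== CLAIM (what is proved, stated in full; the proofs are below) =====
def Claim_equal_makeShell : Prop := ∀ (e : Int), Dom_makeShell e → Spec_makeShell e (makeShell e)

-- ===== LEMMAS AND PROOFS =====
-- closed-form middle ground both ports are reduced to: rows of sizes 1..e..1
def pvTable (e : Int) : List (List Int) :=
  (PySem.List.pyRange 1 (e + 1) 1 ++ PySem.List.pyRange (e - 1) 0 (-1)).map
    (fun n => List.replicate n.toNat 0)

theorem pvZeros_eq (c : Int) : pvZeros c = List.replicate c.toNat 0 := by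
  simp [pvZeros, PySem.List.pyRange_one, List.map_map, Function.comp,
        List.eq_replicate_iff]

theorem pvLoop1_eq (e counter : Int) (acc : List (List Int)) :
    pvLoop1 e acc counter
      = (acc ++ (PySem.List.pyRange counter (e + 1) 1).map pvZeros, max counter (e + 1)) := by
  fun_induction pvLoop1 e acc counter with
  | case1 acc counter h ih =>
      have hc : PySem.List.pyRange counter (e + 1) 1
          = counter :: PySem.List.pyRange (counter + 1) (e + 1) 1 :=
        PySem.List.pyRange_one_cons (by omega)
      rw [ih, hc]
      refine Prod.ext ?_ (by simp; omega)
      simp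
  | case2 acc counter h =>
      have hc : PySem.List.pyRange counter (e + 1) 1 = [] :=
        PySem.List.pyRange_one_eq_nil (by omega)
      rw [hc]
      refine Prod.ext (by simp) (by simp; omega)

theorem pvLoop2_eq (counter : Int) (acc : List (List Int)) :
    pvLoop2 acc counter = acc ++ (PySem.List.pyRange counter 0 (-1)).map pvZeros := by
  fun_induction pvLoop2 acc counter with
  | case1 acc counter h ih =>
      have hc : PySem.List.pyRange counter 0 (-1)
          = counter :: PySem.List.pyRange (counter - 1) 0 (-1) :=
        PySem.List.pyRange_neg_one_cons (by omega)
      rw [ih, hc]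
      simp
  | case2 acc counter h =>
      have hc : PySem.List.pyRange counter 0 (-1) = [] :=
        PySem.List.pyRange_neg_one_eq_nil (by omega)
      rw [hc]
      simp

theorem makeShell_eq_table (e : Int) : makeShell e = pvTable e := by
  have hz : pvZeros = fun n : Int => List.replicate n.toNat 0 := funext pvZeros_eq
  unfold makeShell pvTable
  rw [pvLoop1_eq, pvLoop2_eq]
  by_cases h : 1 ≤ e
  · have hm : max 1 (e + 1) = e + 1 := by omega
    rw [hm]
    simp [hz, show (e + 1 - 2 : Int) = e - 1 from by ring]
  · have hm : max 1 (e + 1) = 1 := by omega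
    have h1 : PySem.List.pyRange 1 (e + 1) 1 = [] := PySem.List.pyRange_one_eq_nil (by omega)
    have h2 : PySem.List.pyRange (-1) 0 (-1) = [] := PySem.List.pyRange_neg_one_eq_nil (by omega)
    have h3 : PySem.List.pyRange (e - 1) 0 (-1) = [] := PySem.List.pyRange_neg_one_eq_nil (by omega)
    simp [hm, h1, h2, h3]

theorem pvGrow_spec (l : List Int) (T : List (List Int)) (m : Nat) :
    l.foldl pvGrowStep (T, List.replicate m 0)
      = (T ++ (List.range l.length).map (fun k => List.replicate (m + k + 1) (0 : Int)),
         List.replicate (m + l.length) 0) := by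
  induction l generalizing T m with
  | nil => simp
  | cons a l ih =>
      have hrow : List.replicate m (0 : Int) ++ [0] = List.replicate (m + 1) 0 :=
        (List.replicate_succ' ..).symm
      simp only [List.foldl_cons, pvGrowStep, hrow]
      rw [ih]
      refine Prod.ext ?_ (by simp; omega)
      simp [List.range_succ_eq_map, List.map_map, Function.comp]
      intro k _
      omega

theorem makeShell_alt_eq_table (e : Int) : makeShell_alt e = pvTable e := by
  unfold makeShell_alt
  have h0 : (([] : List (List Int)), ([] : List Int))
      = (([] : List (List Int)), List.replicate 0 (0 : Int)) := rfl
  rw [h0, pvGrow_spec]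
  have hlen : (PySem.List.pyRange 0 (max e 0) 1).length = e.toNat := by
    rw [PySem.List.length_pyRange_one]; omega
  rw [hlen]
  simp only [List.nil_append]
  set n := e.toNat with hn
  have htop1 : (List.range n).map (fun k => List.replicate (0 + k + 1) (0 : Int))
      = (List.range n).map (fun k => List.replicate (k + 1) (0 : Int)) :=
    List.map_congr_left (fun k _ => by congr 1; omega)
  rw [htop1]
  have hdrop : ((List.range n).map (fun k => List.replicate (k + 1) (0 : Int))).dropLast
      = (List.range (n - 1)).map (fun k => List.replicate (k + 1) (0 : Int)) := by
    cases n with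
    | zero => simp
    | succ m => rw [List.range_succ]; simp
  rw [hdrop]
  unfold pvTable
  rw [List.map_append, PySem.List.pyRange_neg_one_eq_reverse, List.map_reverse]
  have hmid : (List.range (n - 1)).map (fun k => List.replicate (k + 1) (0 : Int))
      = (PySem.List.pyRange 1 e 1).map (fun m => List.replicate m.toNat 0) := by
    rw [PySem.List.pyRange_one, List.map_map,
        show (e - 1).toNat = n - 1 from by omega]
    refine List.map_congr_left (fun k _ => ?_)
    simp only [Function.comp]
    congr 1
    omega
  congr 1
  · rw [PySem.List.pyRange_one, List.map_map,
        show (e + 1 - 1 : Int) = e from by ring, show e.toNat = n from rfl]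
    refine List.map_congr_left (fun k _ => ?_)
    simp only [Function.comp]
    congr 1
    omega
  · rw [show (0 + 1 : Int) = 1 from rfl, show (e - 1 + 1 : Int) = e from by ring]
    simp only [List.map_map]
    rw [show ((fun r => r) ∘ fun k => List.replicate (k + 1) (0 : Int))
          = fun k : Nat => List.replicate (k + 1) (0 : Int) from rfl]
    rw [hmid, List.map_reverse]

-- ===== VERDICT (by name: the statement is the Claim_ definition above) =====
theorem makeShell_spec : Claim_equal_makeShell := by
  intro e _
  show makeShell e = makeShell_alt e
  rw [makeShell_eq_table, makeShell_alt_eq_table]
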